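-- pv_equiv track=rewrite | github.com/PhamHungIT/ultilize-gpu-free | core/utils/utils.py | semhash_tokenizer
-- ===== SOURCE A (Python) =====
-- def find_ngrams(input_list, n_gram=3):
--     return zip(*[input_list[i:] for i in range(n_gram)])
--
-- def semhash_tokenizer(text, use_semhash, n_gram=3):
--     tokens = text.split(" ")
--     if not use_semhash:
--         final_text = " ".join(map(str, tokens))
--     else:
--         final_tokens = []
--         for unhashed_token in tokens:
--             hashed_token = "#{}#".format(unhashed_token)
--             final_tokens += [''.join(gram)
--                              for gram in list(find_ngrams(list(hashed_token), n_gram))]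
--
--         final_text = " ".join(map(str, final_tokens))
--
--     return final_text
-- ===== SOURCE B (Python) =====
-- def semhash_tokenizer(text, use_semhash, n_gram=3):
--     if not use_semhash:
--         return text
--     grams = []
--     for w in text.split(" "):
--         s = "#{}#".format(w)
--         grams.extend(s[i:i + n_gram] for i in range(len(s) - n_gram + 1))
--     return " ".join(grams)
-- ===== Notes on version B (the rewrite author's own statement) =====
-- stated objective: simpler
-- what changed: Replaces find_ngrams' zip(*[l[i:] for i in range(n)]) of n offset lists with a direct sliding window slicing each '#'-wrapped token once per position, and returns text unchanged in the non-semhash branch instead of splitting and re-joining it.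
-- outside the precondition, e.g. on semhash_tokenizer('ab', True, 0): A returns '', B returns '    '; on semhash_tokenizer('ab', True, -1): A returns '', B returns '#ab     '
import Mathlib
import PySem

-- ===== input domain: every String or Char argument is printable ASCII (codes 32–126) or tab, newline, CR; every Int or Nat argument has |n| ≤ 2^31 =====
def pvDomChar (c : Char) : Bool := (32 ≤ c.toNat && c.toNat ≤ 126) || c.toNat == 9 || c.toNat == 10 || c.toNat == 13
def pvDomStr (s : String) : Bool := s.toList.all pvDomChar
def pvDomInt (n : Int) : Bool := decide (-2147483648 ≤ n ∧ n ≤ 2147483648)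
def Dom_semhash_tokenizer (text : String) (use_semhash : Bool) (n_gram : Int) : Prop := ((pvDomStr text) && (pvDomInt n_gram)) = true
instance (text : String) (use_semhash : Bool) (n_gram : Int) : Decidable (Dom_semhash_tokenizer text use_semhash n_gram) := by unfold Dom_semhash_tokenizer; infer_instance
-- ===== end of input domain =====

-- B replaces find_ngrams' zip(*[l[i:] for i in range(n)]) by a direct sliding window over each
-- '#'-wrapped token and returns text unchanged in the non-semhash branch (simpler, same values).

-- ===== PORT A =====
-- zip(*slices): rows of heads while every list is nonempty; fuel bounds the row count
-- (the first slice loses one element per row, so first-slice length + 1 is always enough).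
def pvZipFuel : Nat → List (List Char) → List (List Char)
  | 0, _ => []
  | fuel + 1, ls =>
    if ls.isEmpty then []
    else
      match ls.mapM List.head? with
      | none => []
      | some hs => hs :: pvZipFuel fuel (ls.map List.tail)

def find_ngrams (input_list : List Char) (n_gram : Int) : List (List Char) :=
  let slices := (PySem.List.pyRange 0 n_gram 1).map (fun i => PySem.List.slice input_list (some i) none)
  pvZipFuel ((slices.headD []).length + 1) slices

def semhash_tokenizer (text : String) (use_semhash : Bool) (n_gram : Int) : String :=
  let tokens := PySem.Chars.splitOn text.toList [' ']
  if use_semhash = false then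
    String.ofList (PySem.Chars.join [' '] tokens)
  else
    let final_tokens := tokens.foldl
      (fun acc unhashed_token =>
        let hashed_token : List Char := '#' :: unhashed_token ++ ['#']
        acc ++ find_ngrams hashed_token n_gram) []
    String.ofList (PySem.Chars.join [' '] final_tokens)

-- ===== PORT B =====
def semhash_tokenizer_alt (text : String) (use_semhash : Bool) (n_gram : Int) : String :=
  if use_semhash = false then text
  else
    let words := PySem.Chars.splitOn text.toList [' ']
    let grams := words.flatMap (fun w =>
      let s : List Char := '#' :: w ++ ['#']
      (PySem.List.pyRange 0 ((s.length : Int) - n_gram + 1) 1).map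
        (fun i => PySem.List.slice s (some i) (some (i + n_gram))))
    String.ofList (PySem.Chars.join [' '] grams)

-- ===== PRECONDITION & SPEC =====
-- Pre_ excludes non-positive n_gram when use_semhash is set: there A returns '' only because
-- zip() of an empty argument list yields nothing, while B's sliding window produces degenerate
-- empty slices — a corner no caller specifies, with neither value canonical.
def Pre_semhash_tokenizer (text : String) (use_semhash : Bool) (n_gram : Int) : Prop :=
  use_semhash = true → 1 ≤ n_gram
instance (text : String) (use_semhash : Bool) (n_gram : Int) : Decidable (Pre_semhash_tokenizer text use_semhash n_gram) := by unfold Pre_semhash_tokenizer; infer_instance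
def pvWitness_semhash_tokenizer : String × Bool × Int := ("hi you", true, 3)

def Spec_semhash_tokenizer (text : String) (use_semhash : Bool) (n_gram : Int) (out : String) : Prop := out = semhash_tokenizer_alt text use_semhash n_gram
instance (text : String) (use_semhash : Bool) (n_gram : Int) (out : String) : Decidable (Spec_semhash_tokenizer text use_semhash n_gram out) := by unfold Spec_semhash_tokenizer; infer_instance

-- ===== CLAIM (what is proved, stated in full; the proofs are below) =====
def Claim_equal_semhash_tokenizer : Prop := ∀ (text : String) (use_semhash : Bool) (n_gram : Int), Dom_semhash_tokenizer text use_semhash n_gram → Pre_semhash_tokenizer text use_semhash n_gram → Spec_semhash_tokenizer text use_semhash n_gram (semhash_tokenizer text use_semhash n_gram)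

-- ===== LEMMAS AND PROOFS =====

-- join " " ∘ split " " = id (the non-semhash branch)
def pvSplit : List Char → List Char → List (List Char)
  | [], cur => [cur.reverse]
  | c :: rest, cur => if c = ' ' then cur.reverse :: pvSplit rest [] else pvSplit rest (c :: cur)

theorem pvSplit_ne_nil (l cur : List Char) : pvSplit l cur ≠ [] := by
  induction l generalizing cur with
  | nil => simp [pvSplit]
  | cons c rest ih => by_cases h : c = ' ' <;> simp [pvSplit, h, ih]

theorem pvGo_eq (l : List Char) : ∀ (cur : List Char) (acc : List (List Char)) (fuel : Nat), l.length < fuel →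
    PySem.Chars.splitOn.go [' '] fuel l cur acc = acc.reverse ++ pvSplit l cur := by
  induction l with
  | nil =>
    intro cur acc fuel hf
    obtain ⟨f, rfl⟩ : ∃ f, fuel = f + 1 := ⟨fuel - 1, by omega⟩
    simp [PySem.Chars.splitOn.go, pvSplit]
  | cons c rest ih =>
    intro cur acc fuel hf
    obtain ⟨f, rfl⟩ : ∃ f, fuel = f + 1 := ⟨fuel - 1, by omega⟩
    have hrest : rest.length < f := by simp at hf; omega
    by_cases h : c = ' '
    · subst h
      simp only [PySem.Chars.splitOn.go, List.isPrefixOf, BEq.rfl, Bool.true_and,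
        if_true, List.length_singleton, List.drop_one, List.tail_cons]
      rw [ih [] (cur.reverse :: acc) f hrest]
      simp [pvSplit]
    · have hbe : ([' '].isPrefixOf (c :: rest)) = false := by
        simp [List.isPrefixOf]; exact fun hc => h hc.symm
      simp only [PySem.Chars.splitOn.go, hbe, if_false, Bool.false_eq_true]
      rw [ih (c :: cur) acc f hrest]
      simp [pvSplit, h]

theorem pvJoin_pvSplit (l : List Char) : ∀ cur, PySem.Chars.join [' '] (pvSplit l cur) = cur.reverse ++ l := by
  induction l with
  | nil => intro cur; simp [pvSplit, PySem.Chars.join_singleton]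
  | cons c rest ih =>
    intro cur
    by_cases h : c = ' '
    · subst h
      obtain ⟨q, t, hqt⟩ : ∃ q t, pvSplit rest [] = q :: t := by
        cases hs : pvSplit rest ([] : List Char) with
        | nil => exact absurd hs (pvSplit_ne_nil rest [])
        | cons q t => exact ⟨q, t, rfl⟩
      simp only [pvSplit, if_true]
      rw [hqt, PySem.Chars.join_cons_cons, ← hqt, ih []]
      simp
    · simp only [pvSplit, h, if_false]
      rw [ih (c :: cur)]
      simp

theorem pvJoin_splitOn (cs : List Char) : PySem.Chars.join [' '] (PySem.Chars.splitOn cs [' ']) = cs := by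
  unfold PySem.Chars.splitOn
  rw [pvGo_eq cs [] [] (cs.length + 1) (by omega)]
  simpa using pvJoin_pvSplit cs []

-- the common characterisation: all n-length windows of l, left to right
def pvWindows (n : Nat) : List Char → List (List Char)
  | [] => []
  | c :: t => if n ≤ t.length + 1 then (c :: t).take n :: pvWindows n t else []

def pvDrops (l : List Char) (n : Nat) : List (List Char) := (List.range n).map (l.drop ·)

theorem pvDrops_succ (l : List Char) (n : Nat) : pvDrops l (n + 1) = l :: pvDrops l.tail n := by
  simp only [pvDrops, List.range_succ_eq_map, List.map_cons, List.drop_zero, List.map_map]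
  refine congrArg _ (List.map_congr_left fun k _ => ?_)
  simp [Function.comp, List.drop_tail]

theorem pvDrops_tails (l : List Char) (n : Nat) : (pvDrops l n).map List.tail = pvDrops l.tail n := by
  simp only [pvDrops, List.map_map]
  refine List.map_congr_left fun k _ => ?_
  simp [Function.comp, List.drop_tail]

theorem pvHeads (n : Nat) : ∀ l : List Char, (pvDrops l (n + 1)).mapM List.head? =
    if n + 1 ≤ l.length then some (l.take (n + 1)) else none := by
  induction n with
  | zero =>
    intro l
    cases l with
    | nil => simp [pvDrops]
    | cons c t => simp [pvDrops]
  | succ m ih =>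
    intro l
    cases l with
    | nil => rw [pvDrops_succ]; simp
    | cons c t =>
      rw [pvDrops_succ]
      simp only [List.mapM_cons, List.head?_cons, List.tail_cons, ih t]
      by_cases h : m + 1 ≤ t.length
      · simp [h, show m + 1 + 1 ≤ t.length + 1 by omega]
      · simp [h, show ¬ m + 1 + 1 ≤ t.length + 1 by omega]

theorem pvZip_drops (m : Nat) : ∀ (l : List Char) (fuel : Nat), l.length < fuel →
    pvZipFuel fuel (pvDrops l (m + 1)) = pvWindows (m + 1) l := by
  intro l
  induction l with
  | nil =>
    intro fuel hf
    obtain ⟨f, rfl⟩ : ∃ f, fuel = f + 1 := ⟨fuel - 1, by omega⟩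
    rw [pvDrops_succ]
    simp [pvZipFuel, pvWindows]
  | cons c t ih =>
    intro fuel hf
    obtain ⟨f, rfl⟩ : ∃ f, fuel = f + 1 := ⟨fuel - 1, by omega⟩
    have hlt : t.length < f := by simp at hf; omega
    have hne : (pvDrops (c :: t) (m + 1)).isEmpty = false := by
      rw [pvDrops_succ]; simp
    simp only [pvZipFuel, hne, Bool.false_eq_true, if_false]
    rw [pvHeads m (c :: t)]
    by_cases h : m + 1 ≤ (c :: t).length
    · simp only [h, if_true]
      rw [pvDrops_tails, List.tail_cons, ih f hlt]
      simp only [pvWindows]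
      rw [if_pos (by simpa using h)]
    · simp only [h, if_false]
      simp only [pvWindows]
      rw [if_neg (by simpa using h)]

-- A's slices [l[i:] for i in range(n)] are pvDrops
theorem pvSlices_eq (l : List Char) (n : Int) (hn : 1 ≤ n) :
    (PySem.List.pyRange 0 n 1).map (fun i => PySem.List.slice l (some i) none) = pvDrops l n.toNat := by
  rw [PySem.List.pyRange_one, List.map_map]
  simp only [sub_zero, pvDrops]
  refine List.map_congr_left fun k _ => ?_
  simp [Function.comp, PySem.List.slice_from_natCast]

-- the shift range(a+1, b+1) = map (+1) (range a b)
theorem pvRange_shift (a b : Int) :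
    PySem.List.pyRange (a + 1) (b + 1) 1 = (PySem.List.pyRange a b 1).map (· + 1) := by
  rw [PySem.List.pyRange_one, PySem.List.pyRange_one, List.map_map]
  have : (b + 1 - (a + 1)) = b - a := by ring
  rw [this]
  refine List.map_congr_left fun k _ => ?_
  simp [Function.comp]; ring

-- B's window comprehension is pvWindows
theorem pvB_windows (n : Int) (hn : 1 ≤ n) : ∀ l : List Char,
    (PySem.List.pyRange 0 ((l.length : Int) - n + 1) 1).map
      (fun i => PySem.List.slice l (some i) (some (i + n))) = pvWindows n.toNat l := by
  intro l
  induction l with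
  | nil =>
    rw [PySem.List.pyRange_one_eq_nil (by simp; omega)]
    simp [pvWindows]
  | cons c t ih =>
    by_cases h : n ≤ (t.length : Int) + 1
    · have hk : (0 : Int) < ((c :: t).length : Int) - n + 1 := by simp; omega
      rw [PySem.List.pyRange_one_cons hk]
      simp only [zero_add, List.map_cons]
      have h1 : PySem.List.slice (c :: t) (some 0) (some n) = (c :: t).take n.toNat := by
        rw [PySem.List.slice_zero_start, PySem.List.slice_to _ (by omega)]
      have h2 : PySem.List.pyRange 1 (((c :: t).length : Int) - n + 1) 1 =
          (PySem.List.pyRange 0 ((t.length : Int) - n + 1) 1).map (· + 1) := by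
        have hsh := pvRange_shift 0 ((t.length : Int) - n + 1)
        simp only [zero_add] at hsh
        rw [show ((c :: t).length : Int) - n + 1 = ((t.length : Int) - n + 1) + 1 by simp; ring]
        exact hsh
      rw [h1, h2, List.map_map]
      have h3 : ∀ i ∈ PySem.List.pyRange 0 ((t.length : Int) - n + 1) 1,
          PySem.List.slice (c :: t) (some (i + 1)) (some (i + 1 + n)) =
          PySem.List.slice t (some i) (some (i + n)) := by
        intro i hi
        have hi0 : 0 ≤ i := ((PySem.List.mem_pyRange_one).mp hi).1
        rw [PySem.List.slice_toNat _ (by omega : (0:Int) ≤ i + 1) (by omega : (0:Int) ≤ i + 1 + n),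
            PySem.List.slice_toNat _ (by omega : (0:Int) ≤ i) (by omega : (0:Int) ≤ i + n)]
        have e1 : (i + 1).toNat = i.toNat + 1 := by omega
        rw [e1, List.drop_succ_cons]
        congr 1
        omega
      rw [List.map_congr_left (fun i hi => by simpa [Function.comp] using h3 i hi), ih]
      simp only [pvWindows]
      rw [if_pos (by omega)]
    · rw [PySem.List.pyRange_one_eq_nil (by simp; omega)]
      simp only [List.map_nil, pvWindows]
      rw [if_neg (by omega)]

-- per-token: find_ngrams = the sliding window
theorem pvToken_eq (s : List Char) (n : Int) (hn : 1 ≤ n) :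
    find_ngrams s n =
    (PySem.List.pyRange 0 ((s.length : Int) - n + 1) 1).map
      (fun i => PySem.List.slice s (some i) (some (i + n))) := by
  unfold find_ngrams
  obtain ⟨m, hm⟩ : ∃ m, n.toNat = m + 1 := ⟨n.toNat - 1, by omega⟩
  rw [pvSlices_eq s n hn, pvB_windows n hn s, hm]
  rw [pvDrops_succ]
  simp only [List.headD_cons]
  rw [← pvDrops_succ]
  exact pvZip_drops m s (s.length + 1) (by omega)

-- ===== VERDICT (by name: the statement is the Claim_ definition above) =====
theorem semhash_tokenizer_spec : Claim_equal_semhash_tokenizer := by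
  intro text use_semhash n_gram _hdom hpre
  unfold Spec_semhash_tokenizer semhash_tokenizer semhash_tokenizer_alt
  cases use_semhash with
  | false =>
    simp only [if_true]
    rw [pvJoin_splitOn, String.ofList_toList]
  | true =>
    have hn : 1 ≤ n_gram := hpre rfl
    simp only [Bool.true_eq_false, if_false]
    rw [PySem.List.foldl_append_eq_flatMap, List.nil_append]
    have hfun : (fun unhashed_token => find_ngrams ('#' :: unhashed_token ++ ['#']) n_gram) =
        (fun w => (PySem.List.pyRange 0 ((((('#' :: w ++ ['#']) : List Char).length : Int)) - n_gram + 1) 1).map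
          (fun i => PySem.List.slice ('#' :: w ++ ['#']) (some i) (some (i + n_gram)))) :=
      funext fun w => pvToken_eq ('#' :: w ++ ['#']) n_gram hn
    rw [hfun]
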